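-- pv_equiv track=rewrite | github.com/SysSec-KAIST/BaseSpec | basespec/preprocess.py | is_valid_reglist
-- ===== SOURCE A (Python) =====
-- def is_valid_reglist(word, is_16bit=False):
--     if is_16bit:
--         word = word & 0x1FF
--         # should contain LR
--         lr = word >> 8 & 1
--         if lr != 1:
--             return False
--
--         regs = word
--
--     else:
--         # should contain LR
--         # should not contain SP, PC
--         sp = word >> 13 & 1
--         lr = word >> 14 & 1
--         pc = word >> 15 & 1
--         if sp != 0 or lr != 1 or pc != 0:
--             return False
--
--         regs = word & 0x1FFF
--
--     # At least one reg should exist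
--     if regs == 0:
--         return False
--
--     # We compute maximum consequtive 1s to find continuous reg-list like
--     # '0001111100000'.
--     if is_16bit:
--         threshold = 0
--     else:
--         threshold = 1
--
--     cnt = 0
--     while regs != 0:
--         regs = regs & (regs << 1)
--         cnt += 1
--
--     if cnt > threshold:
--         return True
--     else:
--         return False
-- ===== SOURCE B (Python) =====
-- def is_valid_reglist(word, is_16bit=False):
--     if is_16bit:
--         # LR set is sufficient: the register mask then has at least one bit,
--         # so the length-1 run already clears the 16-bit threshold of 0.
--         return word >> 8 & 1 == 1
--     if word >> 13 & 1 != 0 or word >> 14 & 1 != 1 or word >> 15 & 1 != 0: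
--         return False
--     regs = word & 0x1FFF
--     # longest run of ones exceeds 1 iff two adjacent bits are both set
--     return regs & (regs << 1) != 0
-- ===== Notes on version B (the rewrite author's own statement) =====
-- stated objective: simpler
-- what changed: Replaced the bit-folding while loop counting the maximum run of consecutive ones with a closed form: the run exceeds the threshold iff (16-bit) LR is set, or (32-bit) regs & (regs << 1) != 0, i.e. two adjacent bits are set.
import Mathlib
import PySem

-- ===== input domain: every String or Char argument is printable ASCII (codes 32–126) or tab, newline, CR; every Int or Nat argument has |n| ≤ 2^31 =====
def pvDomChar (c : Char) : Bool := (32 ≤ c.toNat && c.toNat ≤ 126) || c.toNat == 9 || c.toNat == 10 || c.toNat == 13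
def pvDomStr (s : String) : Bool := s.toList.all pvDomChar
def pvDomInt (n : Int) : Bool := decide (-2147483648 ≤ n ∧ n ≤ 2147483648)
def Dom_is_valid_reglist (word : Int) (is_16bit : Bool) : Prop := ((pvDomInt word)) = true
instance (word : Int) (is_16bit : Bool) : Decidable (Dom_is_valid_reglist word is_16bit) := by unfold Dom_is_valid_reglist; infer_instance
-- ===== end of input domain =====

-- B replaces A's bit-folding while loop (max run of consecutive ones) by a closed form:
-- LR-bit test in 16-bit mode, 'regs & (regs << 1) != 0' (two adjacent set bits) otherwise.

-- ===== PORT A =====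
-- A's 'while regs != 0: regs = regs & (regs << 1); cnt += 1'.  The fuel argument only
-- makes the recursion structural: regs is nonnegative here and strictly decreases each
-- iteration, so fuel regs.toNat + 1 never runs out.
def pvCntLoop : Nat → Int → Nat
  | 0, _ => 0
  | f + 1, regs =>
      if regs = 0 then 0
      else pvCntLoop f (PySem.Int.band regs (regs <<< (1 : Nat))) + 1

def is_valid_reglist (word : Int) (is_16bit : Bool) : Bool :=
  if is_16bit then
    let word' := PySem.Int.band word 511          -- word = word & 0x1FF
    let lr := PySem.Int.band (word' >>> (8 : Nat)) 1
    if lr ≠ 1 then false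
    else
      let regs := word'
      if regs = 0 then false
      else
        let threshold : Nat := 0
        let cnt := pvCntLoop (regs.toNat + 1) regs
        decide (cnt > threshold)
  else
    let sp := PySem.Int.band (word >>> (13 : Nat)) 1
    let lr := PySem.Int.band (word >>> (14 : Nat)) 1
    let pc := PySem.Int.band (word >>> (15 : Nat)) 1
    if sp ≠ 0 ∨ lr ≠ 1 ∨ pc ≠ 0 then false
    else
      let regs := PySem.Int.band word 8191        -- word & 0x1FFF
      if regs = 0 then false
      else
        let threshold : Nat := 1
        let cnt := pvCntLoop (regs.toNat + 1) regs
        decide (cnt > threshold)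

-- ===== PORT B =====
def is_valid_reglist_alt (word : Int) (is_16bit : Bool) : Bool :=
  if is_16bit then
    decide (PySem.Int.band (word >>> (8 : Nat)) 1 = 1)
  else
    if PySem.Int.band (word >>> (13 : Nat)) 1 ≠ 0 ∨
       PySem.Int.band (word >>> (14 : Nat)) 1 ≠ 1 ∨
       PySem.Int.band (word >>> (15 : Nat)) 1 ≠ 0 then false
    else
      let regs := PySem.Int.band word 8191
      decide (PySem.Int.band regs (regs <<< (1 : Nat)) ≠ 0)

-- ===== PRECONDITION & SPEC =====
def Spec_is_valid_reglist (word : Int) (is_16bit : Bool) (out : Bool) : Prop := out = is_valid_reglist_alt word is_16bit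
instance (word : Int) (is_16bit : Bool) (out : Bool) : Decidable (Spec_is_valid_reglist word is_16bit out) := by unfold Spec_is_valid_reglist; infer_instance

-- ===== CLAIM (what is proved, stated in full; the proofs are below) =====
def Claim_equal_is_valid_reglist : Prop := ∀ (word : Int) (is_16bit : Bool), Dom_is_valid_reglist word is_16bit → Spec_is_valid_reglist word is_16bit (is_valid_reglist word is_16bit)

-- ===== LEMMAS AND PROOFS =====

-- x & 0x1FF is the remainder mod 2^9 (Python semantics, negatives included)
theorem pv_band_mask9 (x : Int) : PySem.Int.band x 511 = x % 512 := by
  unfold PySem.Int.band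
  split_ifs with hx hb hb
  · have h1 := Nat.and_two_pow_sub_one_eq_mod x.toNat 9
    norm_num [show (511:Int).toNat = 511 from rfl] at h1 ⊢
    rw [h1]; omega
  · exfalso; omega
  · have h1 := Nat.and_two_pow_sub_one_eq_mod (-x - 1).toNat 9
    norm_num [show (511:Int).toNat = 511 from rfl, Nat.and_comm] at h1 ⊢
    rw [h1]; omega
  · exfalso; omega

-- x & 0x1FFF is the remainder mod 2^13
theorem pv_band_mask13 (x : Int) : PySem.Int.band x 8191 = x % 8192 := by
  unfold PySem.Int.band
  split_ifs with hx hb hb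
  · have h1 := Nat.and_two_pow_sub_one_eq_mod x.toNat 13
    norm_num [show (8191:Int).toNat = 8191 from rfl] at h1 ⊢
    rw [h1]; omega
  · exfalso; omega
  · have h1 := Nat.and_two_pow_sub_one_eq_mod (-x - 1).toNat 13
    norm_num [show (8191:Int).toNat = 8191 from rfl, Nat.and_comm] at h1 ⊢
    rw [h1]; omega
  · exfalso; omega

theorem pv_band_bit1 (x : Int) : PySem.Int.band x 1 = x % 2 := by
  rw [PySem.Int.band_one, PySem.Int.mod_eq_emod_of_pos (by norm_num)]

-- masking with 0x1FF does not change bit 8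
theorem pv_bit8_mask (w : Int) :
    PySem.Int.band (PySem.Int.band w 511 >>> (8 : Nat)) 1 = PySem.Int.band (w >>> (8 : Nat)) 1 := by
  rw [pv_band_mask9, pv_band_bit1, pv_band_bit1, Int.shiftRight_eq_div_pow, Int.shiftRight_eq_div_pow]
  norm_num
  omega

-- if bit 8 is set, the masked word is nonzero
theorem pv_bit8_ne_zero (w : Int) (h : PySem.Int.band (w >>> (8 : Nat)) 1 = 1) :
    PySem.Int.band w 511 ≠ 0 := by
  rw [pv_band_bit1, Int.shiftRight_eq_div_pow] at h
  rw [pv_band_mask9]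
  norm_num at h
  omega

-- A's loop makes at least one step iff regs ≠ 0
theorem pvCntLoop_pos (f : Nat) (r : Int) : 0 < pvCntLoop (f + 1) r ↔ r ≠ 0 := by
  by_cases h : r = 0 <;> simp [pvCntLoop, h]

-- A's loop makes at least two steps iff regs has two adjacent set bits
theorem pvCntLoop_gt_one (r : Int) (hr : 0 ≤ r) (hne : r ≠ 0) :
    1 < pvCntLoop (r.toNat + 1) r ↔ PySem.Int.band r (r <<< (1 : Nat)) ≠ 0 := by
  obtain ⟨k, hk⟩ : ∃ k, r.toNat = k + 1 := ⟨r.toNat - 1, by omega⟩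
  rw [hk]
  show 1 < pvCntLoop (k + 1 + 1) r ↔ _
  rw [show pvCntLoop (k + 1 + 1) r
        = pvCntLoop (k + 1) (PySem.Int.band r (r <<< (1 : Nat))) + 1 from by
        simp [pvCntLoop, hne]]
  have := pvCntLoop_pos k (PySem.Int.band r (r <<< (1 : Nat)))
  omega

-- ===== VERDICT (by name: the statement is the Claim_ definition above) =====
theorem is_valid_reglist_spec : Claim_equal_is_valid_reglist := by
  intro word is16 _hdom
  unfold Spec_is_valid_reglist
  cases is16 with
  | true =>
    simp only [is_valid_reglist, is_valid_reglist_alt]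
    by_cases h : PySem.Int.band (word >>> (8 : Nat)) 1 = 1
    · have hmask := pv_bit8_mask word
      have hne := pv_bit8_ne_zero word h
      simp [hmask, h, hne, pvCntLoop_pos (PySem.Int.band word 511).toNat]
    · have hmask := pv_bit8_mask word
      simp [hmask, h]
  | false =>
    simp only [is_valid_reglist, is_valid_reglist_alt, Bool.false_eq_true]
    by_cases hg : PySem.Int.band (word >>> (13 : Nat)) 1 ≠ 0 ∨
        PySem.Int.band (word >>> (14 : Nat)) 1 ≠ 1 ∨
        PySem.Int.band (word >>> (15 : Nat)) 1 ≠ 0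
    · simp [hg]
    · by_cases hz : PySem.Int.band word 8191 = 0
      · simp [hg, hz]
      · have hr : 0 ≤ PySem.Int.band word 8191 := by rw [pv_band_mask13]; omega
        simp [hg, hz, pvCntLoop_gt_one (PySem.Int.band word 8191) hr hz]
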